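-- pv_equiv track=rewrite | github.com/inocult/studio3-docs | fix_info_blocks.py | fix_info_blocks
-- ===== SOURCE A (Python) =====
-- def fix_info_blocks(content):
--     """Fix info block formatting where bold text with colons is split across lines."""
--     # Pattern to match info blocks
--     lines = content.split('\n')
--     fixed_lines = []
--     i = 0
--
--     while i < len(lines):
--         line = lines[i]
--
--         # Check if we're in an info block
--         if line.strip().startswith('!!! info') or line.strip().startswith('!!! warning') or line.strip().startswith('!!! tip'):
--             fixed_lines.append(line)
--             i += 1
--
--             # Process the content of the info block
--             while i < len(lines) and not lines[i].strip().startswith('!!!'):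
--                 current_line = lines[i]
--
--                 # Check if this line starts with spaces and contains **text:
--                 if '    **' in current_line and current_line.strip().endswith(':'):
--                     # This is the start of a broken bold text with colon
--                     bold_text = current_line
--                     i += 1
--
--                     # Skip empty line if present
--                     if i < len(lines) and lines[i].strip() == '':
--                         i += 1
--
--                     # Get the continuation (should end with **)
--                     if i < len(lines) and lines[i].strip().endswith('**'):
--                         continuation = lines[i].strip()
--                         # Combine them on one line
--                         fixed_line = bold_text.rstrip(':') + ':' + continuation
--                         fixed_lines.append(fixed_line)
--                         i += 1
--                     else:
--                         # If no continuation found, just add the original line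
--                         fixed_lines.append(current_line)
--                         i += 1
--                 else:
--                     fixed_lines.append(current_line)
--                     i += 1
--         else:
--             fixed_lines.append(line)
--             i += 1
--
--     return '\n'.join(fixed_lines)
-- ===== SOURCE B (Python) =====
-- def _is_header(line):
--     s = line.strip()
--     return s.startswith('!!! info') or s.startswith('!!! warning') or s.startswith('!!! tip')
--
--
-- def _step(lines, i, in_block):
--     """Pure transition: given position i and whether we are inside an info block,
--     return (lines to emit, number of source lines consumed, new in_block flag)."""
--     line = lines[i]
--     if not in_block:
--         return [line], 1, _is_header(line)
--     if line.strip().startswith('!!!'):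
--         return [line], 1, _is_header(line)
--     if '    **' in line and line.strip().endswith(':'):
--         j = i + 1
--         if j < len(lines) and lines[j].strip() == '':
--             j += 1
--         if j < len(lines) and lines[j].strip().endswith('**'):
--             return [line.rstrip(':') + ':' + lines[j].strip()], j + 1 - i, True
--         return [line], j + 1 - i, True
--     return [line], 1, True
--
--
-- def fix_info_blocks(content):
--     """Fix info block formatting where bold text with colons is split across lines."""
--     lines = content.split('\n')
--     out = []
--     i = 0
--     in_block = False
--     while i < len(lines):
--         emitted, consumed, in_block = _step(lines, i, in_block)
--         out.extend(emitted)
--         i += consumed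
--     return '\n'.join(out)
-- ===== Notes on version B (the rewrite author's own statement) =====
-- stated objective: simpler
-- what changed: A's two nested while-loops with in-place index mutation and an inline lookahead are replaced by one top-level loop driven by a pure transition function that returns (lines to emit, lines consumed, new in-block flag), i.e. an explicit two-state machine.
import Mathlib
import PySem

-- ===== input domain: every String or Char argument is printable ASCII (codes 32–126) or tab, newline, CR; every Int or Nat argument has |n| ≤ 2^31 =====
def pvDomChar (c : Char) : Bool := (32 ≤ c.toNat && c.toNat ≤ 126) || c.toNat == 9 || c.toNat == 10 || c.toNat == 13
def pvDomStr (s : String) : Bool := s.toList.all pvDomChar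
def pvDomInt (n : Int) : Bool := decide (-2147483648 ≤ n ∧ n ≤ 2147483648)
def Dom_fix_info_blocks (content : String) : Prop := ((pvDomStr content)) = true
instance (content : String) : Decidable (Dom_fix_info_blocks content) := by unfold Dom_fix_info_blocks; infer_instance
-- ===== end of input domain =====

-- B replaces A's two nested while-loops with mutable index arithmetic by a single loop
-- driven by a pure transition function (emit, consume, next-state); same results.

-- shared primitive: Python's s.rstrip(':') (drop trailing ':' characters), ported by hand
-- (exact: rstrip with an explicit char set is not in PySem)
def pvRstripColon (s : String) : String :=
  String.ofList ((s.toList.reverse.dropWhile (· == ':')).reverse)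

-- shared primitive: the two-line "skip one blank line" lookahead both Pythons contain:
-- given candidate index j, return j+1 if lines[j] exists and strips to '', else j
def pvSkipBlank (lines : List String) (j : Nat) : Nat :=
  if j < lines.length && PySem.Str.strip (lines.getD j "") == "" then j + 1 else j

theorem pvSkipBlank_ge (lines : List String) (j : Nat) :
    j ≤ pvSkipBlank lines j ∧ pvSkipBlank lines j ≤ j + 1 := by
  unfold pvSkipBlank; split <;> omega

-- ===== PORT A =====
-- A's outer while-loop (index i, not inside an info block) and inner while-loop
-- (inside a block), transcribed as mutual recursion on the index.
mutual
def pvAouter (lines : List String) (i : Nat) : List String :=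
  if _h : i < lines.length then
    let line := lines.getD i ""
    if PySem.Str.startswith (PySem.Str.strip line) "!!! info"
        || PySem.Str.startswith (PySem.Str.strip line) "!!! warning"
        || PySem.Str.startswith (PySem.Str.strip line) "!!! tip" then
      line :: pvAinner lines (i + 1)
    else
      line :: pvAouter lines (i + 1)
  else []
termination_by 2 * (lines.length - i)

def pvAinner (lines : List String) (i : Nat) : List String :=
  if _h : i < lines.length ∧ ¬ (PySem.Str.startswith (PySem.Str.strip (lines.getD i "")) "!!!" = true) then
    let cur := lines.getD i ""
    if PySem.Str.isIn "    **" cur && PySem.Str.endswith (PySem.Str.strip cur) ":" then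
      -- i += 1; skip one empty line if present
      let i2 := pvSkipBlank lines (i + 1)
      if i2 < lines.length && PySem.Str.endswith (PySem.Str.strip (lines.getD i2 "")) "**" then
        (pvRstripColon cur ++ ":" ++ PySem.Str.strip (lines.getD i2 "")) :: pvAinner lines (i2 + 1)
      else
        cur :: pvAinner lines (i2 + 1)
    else
      cur :: pvAinner lines (i + 1)
  else
    pvAouter lines i
termination_by 2 * (lines.length - i) + 1
decreasing_by
  all_goals (have := pvSkipBlank_ge lines (i + 1); omega)
end

def fix_info_blocks (content : String) : String :=
  PySem.Str.join "\n" (pvAouter ((PySem.Str.split? content "\n").getD []) 0)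

-- ===== PORT B =====
def pvIsHeader (line : String) : Bool :=
  let s := PySem.Str.strip line
  PySem.Str.startswith s "!!! info" || PySem.Str.startswith s "!!! warning" || PySem.Str.startswith s "!!! tip"

-- pure transition function: (lines to emit, lines consumed, new in-block flag)
def pvStep (lines : List String) (i : Nat) (inBlock : Bool) : List String × Nat × Bool :=
  let line := lines.getD i ""
  if !inBlock then
    ([line], 1, pvIsHeader line)
  else if PySem.Str.startswith (PySem.Str.strip line) "!!!" then
    ([line], 1, pvIsHeader line)
  else if PySem.Str.isIn "    **" line && PySem.Str.endswith (PySem.Str.strip line) ":" then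
    let j := pvSkipBlank lines (i + 1)
    if j < lines.length && PySem.Str.endswith (PySem.Str.strip (lines.getD j "")) "**" then
      ([pvRstripColon line ++ ":" ++ PySem.Str.strip (lines.getD j "")], j + 1 - i, true)
    else
      ([line], j + 1 - i, true)
  else
    ([line], 1, true)

theorem pvStep_pos (lines : List String) (i : Nat) (b : Bool) :
    1 ≤ (pvStep lines i b).2.1 := by
  unfold pvStep
  have := pvSkipBlank_ge lines (i + 1)
  have h := pvSkipBlank_ge lines (i + 1)
  dsimp only
  split_ifs <;> simp <;> omega

def pvRun (lines : List String) (i : Nat) (inBlock : Bool) : List String :=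
  if i < lines.length then
    let s := pvStep lines i inBlock
    s.1 ++ pvRun lines (i + s.2.1) s.2.2
  else []
termination_by lines.length - i
decreasing_by have := pvStep_pos lines i inBlock; omega

def fix_info_blocks_alt (content : String) : String :=
  PySem.Str.join "\n" (pvRun ((PySem.Str.split? content "\n").getD []) 0 false)

-- ===== PRECONDITION & SPEC =====
def Spec_fix_info_blocks (content : String) (out : String) : Prop := out = fix_info_blocks_alt content
instance (content : String) (out : String) : Decidable (Spec_fix_info_blocks content out) := by unfold Spec_fix_info_blocks; infer_instance

-- ===== CLAIM (what is proved, stated in full; the proofs are below) =====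
def Claim_equal_fix_info_blocks : Prop := ∀ (content : String), Dom_fix_info_blocks content → Spec_fix_info_blocks content (fix_info_blocks content)

-- ===== LEMMAS AND PROOFS =====

-- A's header test (strip recomputed three times) is B's pvIsHeader
theorem pvIsHeader_eq (line : String) :
    (PySem.Str.startswith (PySem.Str.strip line) "!!! info"
      || PySem.Str.startswith (PySem.Str.strip line) "!!! warning"
      || PySem.Str.startswith (PySem.Str.strip line) "!!! tip") = pvIsHeader line := rfl

-- past the end of the lines, all three loops stop
theorem pv_base (lines : List String) (i : Nat) (hge : ¬ i < lines.length) :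
    pvAouter lines i = pvRun lines i false ∧ pvAinner lines i = pvRun lines i true := by
  have hA : pvAouter lines i = [] := by rw [pvAouter]; simp [hge]
  have hR : ∀ b, pvRun lines i b = [] := by intro b; rw [pvRun]; simp [hge]
  have hI : pvAinner lines i = pvAouter lines i := by
    rw [pvAinner]; rw [dif_neg (by simp [hge])]
  exact ⟨by rw [hA, hR], by rw [hI, hA, hR]⟩

-- one step of A's inner loop is one pvStep of B's machine in state `true`
theorem pv_inner_step (lines : List String) (n : Nat)
    (ih : ∀ i, lines.length - i ≤ n → pvAouter lines i = pvRun lines i false ∧ pvAinner lines i = pvRun lines i true)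
    (i : Nat) (h : lines.length - i ≤ n + 1) (hi : i < lines.length) :
    pvAinner lines i = pvRun lines i true := by
  rw [pvAinner, pvRun]
  simp only [hi, if_true, pvStep, Bool.not_true, Bool.false_eq_true, if_false]
  cases hbang : PySem.Str.startswith (PySem.Str.strip (lines.getD i "")) "!!!"
  · -- not a '!!!' line: A's inner body vs pvStep's bold-colon branches
    rw [dif_pos (by simp)]
    simp only [Bool.false_eq_true, if_false]
    try dsimp only
    cases hbold : (PySem.Str.isIn "    **" (lines.getD i "")
        && PySem.Str.endswith (PySem.Str.strip (lines.getD i "")) ":")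
    · simp only [Bool.false_eq_true, if_false]
      exact congrArg _ ((ih (i + 1) (by omega)).2)
    · simp only [if_true]
      have hj := pvSkipBlank_ge lines (i + 1)
      have hstep : i + (pvSkipBlank lines (i + 1) + 1 - i) = pvSkipBlank lines (i + 1) + 1 := by omega
      cases hcont : (decide (pvSkipBlank lines (i + 1) < lines.length)
          && PySem.Str.endswith (PySem.Str.strip (lines.getD (pvSkipBlank lines (i + 1)) "")) "**")
      · simp [hstep, (ih (pvSkipBlank lines (i + 1) + 1) (by omega)).2]
      · simp [hstep, (ih (pvSkipBlank lines (i + 1) + 1) (by omega)).2]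
  · -- a '!!!' line: A's inner loop exits and the outer loop re-examines it
    rw [dif_neg (by simp)]
    rw [pvAouter, dif_pos hi]
    dsimp only
    simp only [if_true]
    rw [pvIsHeader_eq]
    cases hhd : pvIsHeader (lines.getD i "") <;>
      simp only [Bool.false_eq_true, if_false, if_true] <;>
      simp [(ih (i + 1) (by omega)).1, (ih (i + 1) (by omega)).2]

-- invariant: A's outer loop is B's machine in state `false`, A's inner loop is B's
-- machine in state `true`; induction on the number of lines left
theorem pv_agree (lines : List String) :
    ∀ n i, lines.length - i ≤ n →
      pvAouter lines i = pvRun lines i false ∧ pvAinner lines i = pvRun lines i true := by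
  intro n
  induction n with
  | zero => exact fun i h => pv_base lines i (by omega)
  | succ n ih =>
    intro i h
    by_cases hi : i < lines.length
    · constructor
      · rw [pvAouter, pvRun]
        simp only [hi, if_true, pvStep, Bool.not_false]
        rw [pvIsHeader_eq]
        cases hhd : pvIsHeader (lines.getD i "") <;>
          simp only [if_true, if_false, Bool.false_eq_true] <;>
          simp [(ih (i + 1) (by omega)).1, (ih (i + 1) (by omega)).2]
      · exact pv_inner_step lines n ih i h hi
    · exact pv_base lines i hi

-- ===== VERDICT (by name: the statement is the Claim_ definition above) =====
theorem fix_info_blocks_spec : Claim_equal_fix_info_blocks := by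
  intro content _
  unfold Spec_fix_info_blocks fix_info_blocks fix_info_blocks_alt
  rw [(pv_agree ((PySem.Str.split? content "\n").getD []) _ 0 le_rfl).1]
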